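-- pv_equiv track=rewrite | github.com/tcprescott/sahasrahbot | alttprbot/cogs/tournament.py | build_multistream_links
-- ===== SOURCE A (Python) =====
-- def build_multistream_links(race):
--     twitchnames = []
--     for entrant in race['entrants']:
--         twitch = race['entrants'][entrant]['twitch']
--         if not twitch=="":
--             twitchnames.append(twitch)
--
--     chunks = [twitchnames[i * 4:(i + 1) * 4] for i in range((len(twitchnames) + 4 - 1) // 4 )]
--     multi = "Multistream links:\n\n"
--     for chunk in chunks:
--         multi += '<https://multistre.am/{streams}/layout12/>\n'.format(
--             streams='/'.join(chunk)
--         )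
--     return multi
-- ===== SOURCE B (Python) =====
-- def build_multistream_links(race):
--     multi = "Multistream links:\n\n"
--     current = []
--     for entrant in race['entrants'].values():
--         twitch = entrant['twitch']
--         if twitch != "":
--             current.append(twitch)
--             if len(current) == 4:
--                 multi += '<https://multistre.am/{streams}/layout12/>\n'.format(streams='/'.join(current))
--                 current = []
--     if current:
--         multi += '<https://multistre.am/{streams}/layout12/>\n'.format(streams='/'.join(current))
--     return multi
-- ===== Notes on version B (the rewrite author's own statement) =====
-- stated objective: simpler
-- what changed: B fuses filtering, chunking and formatting into one pass with a running group of up to 4 streams, emitting a link whenever the group fills and flushing the remainder, instead of materializing the twitchnames list and a slice-comprehension chunks list.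
import Mathlib
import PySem

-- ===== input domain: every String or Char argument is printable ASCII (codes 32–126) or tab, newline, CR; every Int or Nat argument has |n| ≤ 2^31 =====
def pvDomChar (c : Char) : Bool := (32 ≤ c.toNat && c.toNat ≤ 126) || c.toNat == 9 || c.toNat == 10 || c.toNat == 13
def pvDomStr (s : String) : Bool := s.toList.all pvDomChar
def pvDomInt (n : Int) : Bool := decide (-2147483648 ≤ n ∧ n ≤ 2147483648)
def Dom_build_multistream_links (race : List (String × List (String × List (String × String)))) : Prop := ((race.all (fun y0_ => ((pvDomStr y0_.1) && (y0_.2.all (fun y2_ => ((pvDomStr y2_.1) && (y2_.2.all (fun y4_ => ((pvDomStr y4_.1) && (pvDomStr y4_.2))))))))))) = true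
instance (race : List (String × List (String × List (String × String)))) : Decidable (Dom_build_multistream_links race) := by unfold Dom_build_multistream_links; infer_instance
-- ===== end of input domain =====

-- B replaces A's twitchnames list + slice-comprehension chunks list by a single pass with a
-- running group of up to 4 streams (objective: simpler).

-- the multistream link line for one chunk (shared formatting constant of both ports)
def pvFmt (chunk : List String) : String :=
  "<https://multistre.am/" ++ PySem.Str.join "/" chunk ++ "/layout12/>\n"

-- ===== PORT A =====
def build_multistream_links (race : List (String × List (String × List (String × String)))) : String :=
  match (PySem.Dict.ofList race).get? "entrants" with
  | none => ""  -- KeyError: excluded by Pre_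
  | some ents =>
    let ed := PySem.Dict.ofList ents
    let twitchnames := ed.keys.foldl (fun acc entrant =>
      match ed.get? entrant with
      | none => acc  -- unreachable: entrant ∈ ed.keys
      | some fields =>
        match (PySem.Dict.ofList fields).get? "twitch" with
        | none => acc  -- KeyError: excluded by Pre_
        | some twitch => if twitch == "" then acc else acc ++ [twitch]) []
    let chunks := (PySem.List.pyRange 0 (PySem.Int.floordiv ((twitchnames.length : Int) + 4 - 1) 4) 1).map
      (fun i => PySem.List.slice twitchnames (some (i * 4)) (some ((i + 1) * 4)))
    chunks.foldl (fun multi chunk => multi ++ pvFmt chunk) "Multistream links:\n\n"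

-- ===== PORT B =====
def build_multistream_links_alt (race : List (String × List (String × List (String × String)))) : String :=
  match (PySem.Dict.ofList race).get? "entrants" with
  | none => ""  -- KeyError: excluded by Pre_
  | some ents =>
    let st := (PySem.Dict.ofList ents).values.foldl (fun st entrant =>
      match (PySem.Dict.ofList entrant).get? "twitch" with
      | none => st  -- KeyError: excluded by Pre_
      | some twitch =>
        if twitch == "" then st
        else
          let current := st.2 ++ [twitch]
          if current.length == 4 then (st.1 ++ pvFmt current, ([] : List String))
          else (st.1, current)) ("Multistream links:\n\n", ([] : List String))
    if st.2.isEmpty then st.1 else st.1 ++ pvFmt st.2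

-- ===== PRECONDITION & SPEC =====
-- Pre_ excludes exactly the inputs where Python A raises KeyError: a race dict without the
-- 'entrants' key, or an entrant dict without the 'twitch' key.
def Pre_build_multistream_links (race : List (String × List (String × List (String × String)))) : Prop :=
  ((PySem.Dict.ofList race).get? "entrants").isSome = true ∧
  ∀ p ∈ (PySem.Dict.ofList (((PySem.Dict.ofList race).get? "entrants").getD [])).items,
    (PySem.Dict.ofList p.2).contains "twitch" = true
instance (race : List (String × List (String × List (String × String)))) : Decidable (Pre_build_multistream_links race) := by unfold Pre_build_multistream_links; infer_instance

def pvWitness_build_multistream_links : (List (String × List (String × List (String × String)))) :=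
  [("entrants", [("player1", [("twitch", "alpha")]), ("player2", [("twitch", "")])])]

def Spec_build_multistream_links (race : List (String × List (String × List (String × String)))) (out : String) : Prop := out = build_multistream_links_alt race
instance (race : List (String × List (String × List (String × String)))) (out : String) : Decidable (Spec_build_multistream_links race out) := by unfold Spec_build_multistream_links; infer_instance

-- ===== CLAIM (what is proved, stated in full; the proofs are below) =====
def Claim_equal_build_multistream_links : Prop := ∀ (race : List (String × List (String × List (String × String)))), Dom_build_multistream_links race → Pre_build_multistream_links race → Spec_build_multistream_links race (build_multistream_links race)

-- ===== LEMMAS AND PROOFS =====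

-- the per-entrant extraction both loops perform on the entrant's field dict
def pvExtract (fields : List (String × String)) : Option String :=
  match (PySem.Dict.ofList fields).get? "twitch" with
  | none => none
  | some twitch => if twitch == "" then none else some twitch

-- successive blocks of 4
def pvChunk4 (l : List String) : List (List String) :=
  match l with
  | [] => []
  | x :: xs => (x :: xs).take 4 :: pvChunk4 ((x :: xs).drop 4)
  termination_by l.length
  decreasing_by simp

-- one step of A's filter loop, through pvExtract
theorem stepA_eq (acc : List String) (f : List (String × String)) :
    (match (PySem.Dict.ofList f).get? "twitch" with
      | none => acc
      | some twitch => if twitch == "" then acc else acc ++ [twitch])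
    = acc ++ (pvExtract f).toList := by
  unfold pvExtract
  cases (PySem.Dict.ofList f).get? "twitch" with
  | none => simp
  | some tw => by_cases h : tw == "" <;> simp [h]

-- A's append-accumulating filter loop is a filterMap
theorem filter_loop_eq_filterMap {α : Type} (g : α → List (String × String)) (l : List α) (acc : List String) :
    l.foldl (fun acc x =>
      match (PySem.Dict.ofList (g x)).get? "twitch" with
      | none => acc
      | some twitch => if twitch == "" then acc else acc ++ [twitch]) acc
      = acc ++ l.filterMap (fun x => pvExtract (g x)) := by
  induction l generalizing acc with
  | nil => simp
  | cons f fs ih =>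
    simp only [List.foldl_cons, List.filterMap_cons]
    rw [stepA_eq acc (g f), ih]
    cases h : pvExtract (g f) <;> simp

-- B's loop ignores entrants without a usable twitch name
theorem b_fold_eq_filterMap_fold (l : List (List (String × String))) (st : String × List String) :
    l.foldl (fun st entrant =>
      match (PySem.Dict.ofList entrant).get? "twitch" with
      | none => st
      | some twitch =>
        if twitch == "" then st
        else
          let current := st.2 ++ [twitch]
          if current.length == 4 then (st.1 ++ pvFmt current, ([] : List String))
          else (st.1, current)) st
    = (l.filterMap pvExtract).foldl (fun st tw =>
        let current := st.2 ++ [tw]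
        if current.length == 4 then (st.1 ++ pvFmt current, ([] : List String))
        else (st.1, current)) st := by
  induction l generalizing st with
  | nil => rfl
  | cons f fs ih =>
    simp only [List.foldl_cons, List.filterMap_cons]
    cases h : (PySem.Dict.ofList f).get? "twitch" with
    | none =>
      have hx : pvExtract f = none := by simp [pvExtract, h]
      rw [hx]
      exact ih st
    | some tw =>
      have hx : pvExtract f = if tw == "" then none else some tw := by simp [pvExtract, h]
      rw [hx]
      by_cases he : tw == ""
      · simp only [he, if_true]
        exact ih st
      · simp only [he, Bool.false_eq_true, if_false, List.foldl_cons]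
        exact ih _

-- the group-of-4 invariant of B's emitting loop
theorem b_group_invariant (rest : List String) (m : String) (cur : List String)
    (h : cur.length < 4) :
    (if (rest.foldl (fun st tw =>
        let current := st.2 ++ [tw]
        if current.length == 4 then (st.1 ++ pvFmt current, ([] : List String))
        else (st.1, current)) (m, cur)).2.isEmpty
     then (rest.foldl (fun st tw =>
        let current := st.2 ++ [tw]
        if current.length == 4 then (st.1 ++ pvFmt current, ([] : List String))
        else (st.1, current)) (m, cur)).1
     else (rest.foldl (fun st tw =>
        let current := st.2 ++ [tw]
        if current.length == 4 then (st.1 ++ pvFmt current, ([] : List String))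
        else (st.1, current)) (m, cur)).1 ++ pvFmt (rest.foldl (fun st tw =>
        let current := st.2 ++ [tw]
        if current.length == 4 then (st.1 ++ pvFmt current, ([] : List String))
        else (st.1, current)) (m, cur)).2)
    = (pvChunk4 (cur ++ rest)).foldl (fun multi chunk => multi ++ pvFmt chunk) m := by
  induction rest generalizing m cur with
  | nil =>
    cases cur with
    | nil => simp [pvChunk4]
    | cons c cs =>
      rw [List.append_nil, pvChunk4]
      have h1 : (c :: cs).take 4 = c :: cs := List.take_of_length_le (by simp at h ⊢; omega)
      have h2 : (c :: cs).drop 4 = [] := List.drop_of_length_le (by simp at h ⊢; omega)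
      simp [h1, h2, pvChunk4]
  | cons t rest' ih =>
    simp only [List.foldl_cons]
    by_cases h4 : (cur ++ [t]).length = 4
    · have h4' : ((cur ++ [t]).length == 4) = true := by simp [h4]
      simp only [h4', if_true]
      rw [ih (m ++ pvFmt (cur ++ [t])) [] (by simp), List.nil_append]
      have hsplit : pvChunk4 (cur ++ t :: rest') = (cur ++ [t]) :: pvChunk4 rest' := by
        have hc : cur ++ t :: rest' = (cur ++ [t]) ++ rest' := by simp
        rw [hc]
        cases hcc : cur ++ [t] with
        | nil => simp at hcc
        | cons y ys =>
          have hyl : (y :: ys).length = 4 := by rw [← hcc]; exact h4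
          rw [List.cons_append, pvChunk4, ← List.cons_append]
          rw [List.take_append_of_le_length (by omega), List.take_of_length_le (by omega),
              List.drop_append_of_le_length (by omega), List.drop_of_length_le (le_of_eq hyl),
              List.nil_append]
      rw [hsplit, List.foldl_cons]
    · have h4' : ((cur ++ [t]).length == 4) = false := by simp at h4 ⊢; omega
      simp only [h4', Bool.false_eq_true, if_false]
      rw [ih m (cur ++ [t]) (by simp at h4 ⊢; omega)]
      congr 1
      simp

-- the index/slice comprehension computes the blocks of 4
theorem range_slice_eq_chunk4 (ts : List String) :
    (List.range ((ts.length + 3) / 4)).map (fun k => (ts.drop (4 * k)).take 4) = pvChunk4 ts := by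
  generalize hn : ts.length = n
  induction n using Nat.strong_induction_on generalizing ts with
  | _ n ih =>
    cases ts with
    | nil => simp at hn; subst hn; simp [pvChunk4]
    | cons x xs =>
      have hlen : (x :: xs).length = n := hn
      have hpos : 0 < n := by simp at hlen; omega
      have hsucc : (n + 3) / 4 = ((n - 4 + 3) / 4) + 1 := by omega
      rw [pvChunk4, hsucc, List.range_succ_eq_map]
      simp only [List.map_cons, Nat.mul_zero, List.drop_zero, List.map_map]
      congr 1
      have hdl : ((x :: xs).drop 4).length = n - 4 := by simp [← hlen]
      have hrec := ih (n - 4) (by omega) ((x :: xs).drop 4) hdl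
      rw [← hrec]
      apply List.map_congr_left
      intro k _
      simp only [Function.comp]
      rw [List.drop_drop]
      congr 2
      omega

-- A's slice comprehension, as the port writes it, is pvChunk4
theorem chunksA_eq (ts : List String) :
    (PySem.List.pyRange 0 (PySem.Int.floordiv ((ts.length : Int) + 4 - 1) 4) 1).map
      (fun i => PySem.List.slice ts (some (i * 4)) (some ((i + 1) * 4))) = pvChunk4 ts := by
  have h1 : PySem.Int.floordiv ((ts.length : Int) + 4 - 1) 4 = (((ts.length + 3) / 4 : Nat) : Int) := by
    show ((ts.length : Int) + 4 - 1).fdiv 4 = _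
    rw [Int.fdiv_eq_ediv]
    omega
  rw [h1, PySem.List.pyRange_one]
  rw [← range_slice_eq_chunk4 ts]
  simp only [Int.sub_zero, Int.toNat_natCast, List.map_map]
  apply List.map_congr_left
  intro k _
  simp only [Function.comp, zero_add]
  have e1 : ((k : Int) * 4) = ((k * 4 : Nat) : Int) := by push_cast; ring
  have e2 : (((k : Int) + 1) * 4) = ((k * 4 + 4 : Nat) : Int) := by push_cast; ring
  rw [e1, e2, PySem.List.slice_natCast]
  congr 1
  · omega
  · rw [Nat.mul_comm]

-- ===== VERDICT (by name: the statement is the Claim_ definition above) =====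
theorem build_multistream_links_spec : Claim_equal_build_multistream_links := by
  intro race _ _
  unfold Spec_build_multistream_links build_multistream_links build_multistream_links_alt
  cases hget : (PySem.Dict.ofList race).get? "entrants" with
  | none => rfl
  | some ents =>
    dsimp only
    have hnd : (PySem.Dict.ofList ents).keys.Nodup := PySem.Dict.nodup_keys_ofList ents
    have hA : (PySem.Dict.ofList ents).keys.foldl (fun acc entrant =>
        match (PySem.Dict.ofList ents).get? entrant with
        | none => acc
        | some fields =>
          match (PySem.Dict.ofList fields).get? "twitch" with
          | none => acc
          | some twitch => if twitch == "" then acc else acc ++ [twitch]) []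
        = (PySem.Dict.ofList ents).values.filterMap pvExtract := by
      show List.foldl _ _ ((PySem.Dict.ofList ents).items.map (fun p => p.1)) = _
      rw [List.foldl_map]
      rw [PySem.List.foldl_congr_mem _ _ (fun acc p =>
        match (PySem.Dict.ofList p.2).get? "twitch" with
        | none => acc
        | some twitch => if twitch == "" then acc else acc ++ [twitch]) []
        (by
          intro acc p hp
          obtain ⟨k, v⟩ := p
          rw [PySem.Dict.get?_of_mem_items _ hp hnd])]
      simp only [PySem.Dict.values]
      rw [List.filterMap_map]
      simpa [Function.comp] using
        filter_loop_eq_filterMap (fun (p : String × List (String × String)) => p.2)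
          (PySem.Dict.ofList ents).items []
    rw [hA, chunksA_eq, b_fold_eq_filterMap_fold,
      b_group_invariant ((PySem.Dict.ofList ents).values.filterMap pvExtract)
        "Multistream links:\n\n" [] (by simp), List.nil_append]
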